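-- pv_equiv track=rewrite | github.com/Francescoes/visual_planning | lsr_ltl/unity_stacking_utils.py | get_actions_from_classes
-- ===== SOURCE A (Python) =====
-- def get_actions_from_classes(class1, class2):
--     """
--     Returns the action between consecutive classes
--
--     - class1, class2: consecutive classes
--     """
--
--     #check gamefield
--     pick_action=[-1,-1]
--     place_action=[-1,-1]
--     for i in range(len(class1)):
--         if not class1[i] == class2[i]:
--                 if class1[i] >0 and class2[i] ==0:
--                     pick_action[1]=int(i/3)
--                     pick_action[0]=int(i%3)
--                 if class1[i] ==0 and class2[i] >0:
--                     place_action[1]=int(i/3)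
--                     place_action[0]=int(i%3)
--
--
--     return [pick_action, place_action]
-- ===== SOURCE B (Python) =====
-- def get_actions_from_classes(class1, class2):
--     """
--     Returns the action between consecutive classes
--
--     - class1, class2: consecutive classes
--     """
--
--     def coord(pred):
--         # last matching index wins, so search from the end
--         for i in reversed(range(len(class1))):
--             if pred(class1[i], class2[i]):
--                 return [i % 3, i // 3]
--         return [-1, -1]
--
--     return [coord(lambda a, b: a > 0 and b == 0),
--             coord(lambda a, b: a == 0 and b > 0)]
-- ===== Notes on version B (the rewrite author's own statement) =====
-- stated objective: simpler
-- what changed: A runs one forward loop mutating two accumulator lists with a redundant inequality guard; B computes pick and place independently as two reversed-index searches returning the first (i.e. last-in-A) match, with no accumulator state and no guard.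
import Mathlib
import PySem

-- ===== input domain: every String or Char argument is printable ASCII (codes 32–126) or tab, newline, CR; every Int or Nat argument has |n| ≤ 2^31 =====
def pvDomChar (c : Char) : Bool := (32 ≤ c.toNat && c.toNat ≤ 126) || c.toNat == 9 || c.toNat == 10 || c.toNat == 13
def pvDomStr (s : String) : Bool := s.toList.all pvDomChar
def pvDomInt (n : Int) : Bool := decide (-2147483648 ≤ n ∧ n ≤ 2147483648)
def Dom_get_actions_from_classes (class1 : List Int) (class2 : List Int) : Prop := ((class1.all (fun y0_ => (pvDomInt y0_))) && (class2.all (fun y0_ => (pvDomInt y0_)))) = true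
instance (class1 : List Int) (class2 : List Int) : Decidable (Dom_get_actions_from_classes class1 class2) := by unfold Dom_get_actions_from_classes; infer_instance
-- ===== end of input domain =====

-- B computes pick and place independently with two reversed-index searches (last match = first match from the end),
-- dropping A's redundant inequality guard; objective: simpler decomposition, no speed claim.


-- ===== PORT A =====
-- loop over range(len(class1)); the two element assignments to pick_action/place_action
-- replace the whole 2-element list with [i%3, int(i/3)] (same value, i ≥ 0 so floordiv = int(i/3)).
-- class1[i]/class2[i] via pyGetD; indices are in range under Pre_ (class2[i] raises outside it).
def get_actions_from_classes (class1 : List Int) (class2 : List Int) : List (List Int) :=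
  let st :=
    (PySem.List.pyRange 0 (class1.length : Int) 1).foldl
      (fun (st : List Int × List Int) i =>
        let c1 := PySem.List.pyGetD class1 i 0
        let c2 := PySem.List.pyGetD class2 i 0
        if ¬ c1 = c2 then
          let st := if c1 > 0 ∧ c2 = 0 then ([PySem.Int.mod i 3, PySem.Int.floordiv i 3], st.2) else st
          if c1 = 0 ∧ c2 > 0 then (st.1, [PySem.Int.mod i 3, PySem.Int.floordiv i 3]) else st
        else st)
      ([-1, -1], [-1, -1])
  [st.1, st.2]

-- ===== PORT B =====
-- reversed(range(len(class1))): search downward from index len-1, first hit wins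
def pvCoord (class1 : List Int) (class2 : List Int) (pred : Int → Int → Bool) : Nat → List Int
  | 0 => [-1, -1]
  | Nat.succ k =>
      if pred (PySem.List.pyGetD class1 (k : Int) 0) (PySem.List.pyGetD class2 (k : Int) 0) then
        [PySem.Int.mod (k : Int) 3, PySem.Int.floordiv (k : Int) 3]
      else pvCoord class1 class2 pred k

def get_actions_from_classes_alt (class1 : List Int) (class2 : List Int) : List (List Int) :=
  [pvCoord class1 class2 (fun a b => a > 0 && b == 0) class1.length,
   pvCoord class1 class2 (fun a b => a == 0 && b > 0) class1.length]

-- ===== PRECONDITION & SPEC =====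
-- A indexes class2[i] for every i < len(class1): it raises IndexError when class2 is shorter.
def Pre_get_actions_from_classes (class1 : List Int) (class2 : List Int) : Prop :=
  class1.length ≤ class2.length
instance (class1 : List Int) (class2 : List Int) : Decidable (Pre_get_actions_from_classes class1 class2) := by unfold Pre_get_actions_from_classes; infer_instance

def pvWitness_get_actions_from_classes : List Int × List Int := ([1, 0, 2], [0, 0, 2])

def Spec_get_actions_from_classes (class1 : List Int) (class2 : List Int) (out : List (List Int)) : Prop := out = get_actions_from_classes_alt class1 class2
instance (class1 : List Int) (class2 : List Int) (out : List (List Int)) : Decidable (Spec_get_actions_from_classes class1 class2 out) := by unfold Spec_get_actions_from_classes; infer_instance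

-- ===== CLAIM (what is proved, stated in full; the proofs are below) =====
def Claim_equal_get_actions_from_classes : Prop := ∀ (class1 : List Int) (class2 : List Int), Dom_get_actions_from_classes class1 class2 → Pre_get_actions_from_classes class1 class2 → Spec_get_actions_from_classes class1 class2 (get_actions_from_classes class1 class2)

-- ===== LEMMAS AND PROOFS =====

-- The fold of A over range(0,n) produces exactly B's two downward searches from n.
theorem pvFold_eq (class1 class2 : List Int) (n : Nat) :
    (PySem.List.pyRange 0 (n : Int) 1).foldl
      (fun (st : List Int × List Int) i =>
        let c1 := PySem.List.pyGetD class1 i 0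
        let c2 := PySem.List.pyGetD class2 i 0
        if ¬ c1 = c2 then
          let st := if c1 > 0 ∧ c2 = 0 then ([PySem.Int.mod i 3, PySem.Int.floordiv i 3], st.2) else st
          if c1 = 0 ∧ c2 > 0 then (st.1, [PySem.Int.mod i 3, PySem.Int.floordiv i 3]) else st
        else st)
      ([-1, -1], [-1, -1])
    = (pvCoord class1 class2 (fun a b => a > 0 && b == 0) n,
       pvCoord class1 class2 (fun a b => a == 0 && b > 0) n) := by
  induction n with
  | zero => simp [pvCoord]
  | succ k ih =>
      rw [show ((k + 1 : Nat) : Int) = (k : Int) + 1 by push_cast; ring,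
          PySem.List.pyRange_one_succ_right (by positivity), List.foldl_append, ih]
      simp only [List.foldl_cons, List.foldl_nil, pvCoord]
      set c1 := PySem.List.pyGetD class1 (k : Int) 0 with hc1
      set c2 := PySem.List.pyGetD class2 (k : Int) 0 with hc2
      by_cases h1 : c1 > 0 ∧ c2 = 0
      · have hne : ¬ c1 = c2 := by omega
        simp [hne, h1] <;> intros <;> omega
      · by_cases h2 : c1 = 0 ∧ c2 > 0
        · have hne : ¬ c1 = c2 := by omega
          simp [hne, h1, h2] <;> intros <;> omega
        · by_cases hne : c1 = c2 <;>
            simp [hne, h1, h2] <;> intros <;> omega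

-- ===== VERDICT (by name: the statement is the Claim_ definition above) =====
theorem get_actions_from_classes_spec : Claim_equal_get_actions_from_classes := by
  intro class1 class2 _ _
  unfold Spec_get_actions_from_classes get_actions_from_classes get_actions_from_classes_alt
  rw [pvFold_eq]
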